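-- pv_equiv track=rewrite | github.com/IES-Rafael-Alberti/dam1-2425-ejercicios-u2-JoseLuis-S | src/excepciones/ej23_03.py | generar_cuenta_atras
-- ===== SOURCE A (Python) =====
-- def generar_cuenta_atras(num):
--     serie = ''
--
--     for i in reversed(range(num + 1)):
--         if i == 0:
--             serie += str(i)
--         elif i == 1:
--             serie += str(i) + ' y '
--         else:
--             serie += str(i) + ', '
--
--     return serie
-- ===== SOURCE B (Python) =====
-- def generar_cuenta_atras(num):
--     s = ', '.join(str(i) for i in range(num, -1, -1))
--     head, sep, tail = s.rpartition(', ')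
--     return head + ' y ' + tail if sep else s
-- ===== Notes on version B (the rewrite author's own statement) =====
-- stated objective: simpler
-- what changed: Replaces the per-element i==0/i==1/else branching accumulation loop by building the uniformly comma-separated countdown with one join and then patching only the last separator to ' y ' via rpartition.
import Mathlib
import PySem

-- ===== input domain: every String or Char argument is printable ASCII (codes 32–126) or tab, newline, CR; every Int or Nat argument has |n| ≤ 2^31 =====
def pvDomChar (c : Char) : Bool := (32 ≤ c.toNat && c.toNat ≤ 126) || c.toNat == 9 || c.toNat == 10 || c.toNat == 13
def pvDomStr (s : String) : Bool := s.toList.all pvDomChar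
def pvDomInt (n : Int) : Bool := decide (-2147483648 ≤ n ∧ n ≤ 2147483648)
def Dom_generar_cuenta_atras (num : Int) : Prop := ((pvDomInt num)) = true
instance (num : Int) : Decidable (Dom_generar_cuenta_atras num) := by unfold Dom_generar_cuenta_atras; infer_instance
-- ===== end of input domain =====

-- B builds the uniformly comma-separated countdown with one join, then patches only the
-- last separator to ' y ' via rpartition, instead of A's per-element branching loop (objective: simpler).

-- ===== PORT A =====
-- serie accumulated over reversed(range(num + 1)); strings handled on the List Char side.
def generar_cuenta_atras (num : Int) : String :=
  String.mk (((PySem.List.pyRange 0 (num + 1) 1).reverse).foldl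
    (fun serie i =>
      if i = 0 then serie ++ PySem.Int.toChars i
      else if i = 1 then serie ++ PySem.Int.toChars i ++ " y ".toList
      else serie ++ PySem.Int.toChars i ++ ", ".toList) [])

-- ===== PORT B =====
-- hand port of str.rpartition for a nonempty separator (our call uses ", "): a single
-- tail-recursive scan records the start index of the LAST occurrence of sep; returns
-- some (before, after) around it, none if sep does not occur — exact for nonempty sep
-- (Python's three-way split with empty head/sep when not found is the `none` branch).
def rpartIdx (sep : List Char) : List Char → Nat → Option Nat → Option Nat
  | [], _, best => best
  | c :: rest, i, best =>
      rpartIdx sep rest (i + 1) (if sep.isPrefixOf (c :: rest) then some i else best)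

def pyRpartition (s sep : List Char) : Option (List Char × List Char) :=
  match rpartIdx sep s 0 none with
  | some i => some (s.take i, s.drop (i + sep.length))
  | none => none

def generar_cuenta_atras_alt (num : Int) : String :=
  let s := PySem.Chars.join ", ".toList ((PySem.List.pyRange num (-1) (-1)).map PySem.Int.toChars)
  match pyRpartition s ", ".toList with
  | some (head, tail) => String.mk (head ++ " y ".toList ++ tail)
  | none => String.mk s

-- ===== PRECONDITION & SPEC =====
def Spec_generar_cuenta_atras (num : Int) (out : String) : Prop := out = generar_cuenta_atras_alt num
instance (num : Int) (out : String) : Decidable (Spec_generar_cuenta_atras num out) := by unfold Spec_generar_cuenta_atras; infer_instance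

-- ===== CLAIM (what is proved, stated in full; the proofs are below) =====
def Claim_equal_generar_cuenta_atras : Prop := ∀ (num : Int), Dom_generar_cuenta_atras num → Spec_generar_cuenta_atras num (generar_cuenta_atras num)

-- ===== LEMMAS AND PROOFS =====

-- common description of the countdown string "n, n-1, …, 2, 1 y 0"
def gstr : Nat → List Char
  | 0 => PySem.Int.toChars 0
  | k + 1 => PySem.Int.toChars (k + 1) ++ (if k = 0 then " y ".toList else ", ".toList) ++ gstr k

-- join of the descending tokens "n, n-1, …, 1, 0" (uniform ", ")
def jstr : Nat → List Char
  | 0 => PySem.Int.toChars 0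
  | k + 1 => PySem.Int.toChars (k + 1) ++ ", ".toList ++ jstr k

-- head part "n, …, 2, 1" of the join, indexed so jh k is the head for n = k+1
def jh : Nat → List Char
  | 0 => PySem.Int.toChars 1
  | k + 1 => PySem.Int.toChars (k + 2) ++ ", ".toList ++ jh k

theorem pyRange_neg_cons (n : Nat) :
    PySem.List.pyRange (n : Int) (-1) (-1) = (n : Int) :: PySem.List.pyRange ((n : Int) - 1) (-1) (-1) := by
  exact PySem.List.pyRange_neg_one_cons (by omega)

theorem foldA (n : Nat) (acc : List Char) :
    (PySem.List.pyRange (n : Int) (-1) (-1)).foldl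
      (fun serie i =>
        if i = 0 then serie ++ PySem.Int.toChars i
        else if i = 1 then serie ++ PySem.Int.toChars i ++ " y ".toList
        else serie ++ PySem.Int.toChars i ++ ", ".toList) acc = acc ++ gstr n := by
  induction n generalizing acc with
  | zero =>
    rw [pyRange_neg_cons 0]
    norm_num [PySem.List.pyRange_neg_one_eq_nil, gstr]
  | succ k ih =>
    rw [pyRange_neg_cons (k + 1)]
    have h1 : (((k + 1 : Nat)) : Int) - 1 = (k : Int) := by push_cast; ring
    rw [List.foldl_cons, h1, ih]
    have h0 : ¬ (((k + 1 : Nat) : Int) = 0) := by omega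
    by_cases hk : k = 0
    · subst hk
      rw [if_neg h0]
      simp [gstr, Nat.cast_add, Nat.cast_one, List.append_assoc]
    · have h2 : ¬ (((k + 1 : Nat) : Int) = 1) := by omega
      rw [if_neg h0, if_neg h2]
      simp [gstr, hk, Nat.cast_add, Nat.cast_one, List.append_assoc]

theorem joinB (n : Nat) :
    PySem.Chars.join ", ".toList ((PySem.List.pyRange (n : Int) (-1) (-1)).map PySem.Int.toChars)
      = jstr n := by
  induction n with
  | zero =>
    rw [pyRange_neg_cons 0]
    norm_num [PySem.List.pyRange_neg_one_eq_nil, PySem.Chars.join_singleton, jstr]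
  | succ k ih =>
    rw [pyRange_neg_cons (k + 1)]
    have h1 : (((k + 1 : Nat)) : Int) - 1 = (k : Int) := by push_cast; ring
    rw [List.map_cons, h1, pyRange_neg_cons k, List.map_cons, PySem.Chars.join_cons_cons]
    rw [pyRange_neg_cons k, List.map_cons] at ih
    rw [ih]
    simp [jstr, Nat.cast_add, Nat.cast_one, List.append_assoc]

theorem jstr_eq_jh (k : Nat) : jstr (k + 1) = jh k ++ ", ".toList ++ ['0'] := by
  induction k with
  | zero => simp [jstr, jh]; decide
  | succ m ih =>
    show PySem.Int.toChars (m + 2) ++ ", ".toList ++ jstr (m + 1) = _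
    rw [ih, jh]
    simp [List.append_assoc]

theorem gstr_eq_jh (k : Nat) : gstr (k + 1) = jh k ++ " y ".toList ++ ['0'] := by
  induction k with
  | zero => simp [gstr, jh]; decide
  | succ m ih =>
    show PySem.Int.toChars (m + 2) ++ _ ++ gstr (m + 1) = _
    rw [if_neg (Nat.succ_ne_zero m), ih, jh]
    simp [List.append_assoc]

theorem rpartIdx_last (a : List Char) (i : Nat) (best : Option Nat) :
    rpartIdx ", ".toList (a ++ [',', ' ', '0']) i best = some (i + a.length) := by
  induction a generalizing i best with
  | nil => simp [rpartIdx, List.isPrefixOf]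
  | cons c a' ih =>
    rw [List.cons_append, rpartIdx, ih]
    simp [Nat.add_comm, Nat.add_left_comm]

theorem rpart_jstr (k : Nat) :
    pyRpartition (jstr (k + 1)) ", ".toList = some (jh k, ['0']) := by
  have hj : jstr (k + 1) = jh k ++ [',', ' ', '0'] := by
    rw [jstr_eq_jh]; simp
  rw [pyRpartition, hj, rpartIdx_last]
  have htake : (jh k ++ [',', ' ', '0']).take (0 + (jh k).length) = jh k := by
    simp [List.take_left']
  have hdrop : (jh k ++ [',', ' ', '0']).drop (0 + (jh k).length + (", ".toList).length) = ['0'] := by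
    have : jh k ++ [',', ' ', '0'] = (jh k ++ [',', ' ']) ++ ['0'] := by simp
    rw [this]
    rw [List.drop_left' (by simp)]
  dsimp only
  rw [htake, hdrop]

-- ===== VERDICT (by name: the statement is the Claim_ definition above) =====
theorem generar_cuenta_atras_spec : Claim_equal_generar_cuenta_atras := by
  intro num _
  unfold Spec_generar_cuenta_atras generar_cuenta_atras generar_cuenta_atras_alt
  by_cases hneg : num < 0
  · rw [PySem.List.pyRange_one_eq_nil (by omega), PySem.List.pyRange_neg_one_eq_nil (by omega)]
    rfl
  · push_neg at hneg
    obtain ⟨n, rfl⟩ := Int.eq_ofNat_of_zero_le hneg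
    have hrev : (PySem.List.pyRange 0 ((n : Int) + 1) 1).reverse
        = PySem.List.pyRange (n : Int) (-1) (-1) := by
      rw [PySem.List.pyRange_neg_one_eq_reverse]; norm_num
    rw [hrev, foldA, joinB]
    cases n with
    | zero =>
      have h0 : jstr 0 = ['0'] := by decide
      rw [h0]
      dsimp only
      rw [show pyRpartition ['0'] ", ".toList = none from by decide]
      simp [gstr]
      decide
    | succ k =>
      dsimp only
      rw [rpart_jstr k]
      simp [gstr_eq_jh]
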